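-- pv_equiv track=rewrite | github.com/RayzeBio/Dosimetry-calculator | BioDfunctions.py | get_parameters_fromBioD
-- ===== SOURCE A (Python) =====
-- def get_parameters_fromBioD(readout_name_id,bioD_data):
--     all_parameters = list()
--     for element in bioD_data:
--         try:
--             all_parameters.append(element['readouts'][readout_name_id]['value'])
--         except:
--             all_parameters.append('not defined')
--
--     all_parameters = list(dict.fromkeys(all_parameters))
--     return all_parameters
-- ===== SOURCE B (Python) =====
-- def get_parameters_fromBioD(readout_name_id, bioD_data):
--     vals = []
--     for element in bioD_data:
--         try:
--             vals.append(element['readouts'][readout_name_id]['value'])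
--         except:
--             vals.append('not defined')
--     result = []
--     while vals:
--         head = vals[0]
--         result.append(head)
--         vals = [x for x in vals[1:] if x != head]
--     return result
-- ===== Notes on version B (the rewrite author's own statement) =====
-- stated objective: alternative
-- what changed: Deduplication is done with no dict or set at all: a worklist loop repeatedly takes the first remaining value and filters every later equal value out of the worklist, instead of A's dict.fromkeys hash-based dedup.
import Mathlib
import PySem

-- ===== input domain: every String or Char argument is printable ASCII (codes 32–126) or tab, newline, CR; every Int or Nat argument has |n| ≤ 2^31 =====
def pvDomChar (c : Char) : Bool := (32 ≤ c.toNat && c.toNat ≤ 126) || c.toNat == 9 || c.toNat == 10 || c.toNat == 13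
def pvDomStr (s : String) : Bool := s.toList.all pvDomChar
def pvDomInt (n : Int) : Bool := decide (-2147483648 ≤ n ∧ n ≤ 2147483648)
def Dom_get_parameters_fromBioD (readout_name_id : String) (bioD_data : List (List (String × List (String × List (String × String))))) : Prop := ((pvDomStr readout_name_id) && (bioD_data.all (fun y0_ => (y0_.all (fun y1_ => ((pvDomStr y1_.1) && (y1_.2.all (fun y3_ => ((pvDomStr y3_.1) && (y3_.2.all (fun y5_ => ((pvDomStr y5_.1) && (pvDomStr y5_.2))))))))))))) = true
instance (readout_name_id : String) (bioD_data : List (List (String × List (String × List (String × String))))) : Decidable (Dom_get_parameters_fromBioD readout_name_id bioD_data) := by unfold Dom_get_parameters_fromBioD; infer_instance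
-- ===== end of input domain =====

-- ===== PORT A =====
-- B replaces the dict.fromkeys dedup pass by a worklist loop that repeatedly emits the first
-- remaining value and filters its duplicates out (alternative decomposition; no set/dict).

-- try: element['readouts'][readout_name_id]['value']  except: 'not defined'
-- (any failed dict lookup raises KeyError, caught by the bare except)
def pvValA (readout_name_id : String) (element : List (String × List (String × List (String × String)))) : String :=
  ((((PySem.Dict.mk element).get? "readouts").bind fun d2 =>
      ((PySem.Dict.mk d2).get? readout_name_id)).bind fun d3 =>
      ((PySem.Dict.mk d3).get? "value")).getD "not defined"

def get_parameters_fromBioD (readout_name_id : String) (bioD_data : List (List (String × List (String × List (String × String))))) : List String :=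
  let all_parameters := bioD_data.foldl (fun acc element => acc ++ [pvValA readout_name_id element]) []
  PySem.List.dedup all_parameters

-- ===== PORT B =====
-- the while loop: take vals[0], append to result, filter equal values out of the rest
def pvUniqLoop (result : List String) (vals : List String) : List String :=
  match vals with
  | [] => result
  | h :: t => pvUniqLoop (result ++ [h]) (t.filter (fun x => x ≠ h))
termination_by vals.length
decreasing_by
  simp only [List.length_unattach, List.length_cons]
  exact Nat.lt_succ_of_le (le_trans (List.length_filter_le _ _) (by simp))

def get_parameters_fromBioD_alt (readout_name_id : String) (bioD_data : List (List (String × List (String × List (String × String))))) : List String :=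
  let vals := bioD_data.foldl (fun acc element => acc ++ [pvValA readout_name_id element]) []
  pvUniqLoop [] vals

-- ===== PRECONDITION & SPEC =====

def Spec_get_parameters_fromBioD (readout_name_id : String) (bioD_data : List (List (String × List (String × List (String × String))))) (out : List String) : Prop := out = get_parameters_fromBioD_alt readout_name_id bioD_data
instance (readout_name_id : String) (bioD_data : List (List (String × List (String × List (String × String))))) (out : List String) : Decidable (Spec_get_parameters_fromBioD readout_name_id bioD_data out) := by unfold Spec_get_parameters_fromBioD; infer_instance

-- ===== CLAIM (what is proved, stated in full; the proofs are below) =====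
def Claim_equal_get_parameters_fromBioD : Prop := ∀ (readout_name_id : String) (bioD_data : List (List (String × List (String × List (String × String))))), Dom_get_parameters_fromBioD readout_name_id bioD_data → Spec_get_parameters_fromBioD readout_name_id bioD_data (get_parameters_fromBioD readout_name_id bioD_data)

-- ===== LEMMAS AND PROOFS =====

-- skipping elements already in the accumulator: filtering x (x ∈ s) out of t does not change the fold
theorem pv_foldl_add_filter (t : List String) (s : PySem.Set String) (x : String) (hx : x ∈ s) :
    (t.filter (fun y => y ≠ x)).foldl PySem.Set.add s = t.foldl PySem.Set.add s := by
  induction t generalizing s with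
  | nil => rfl
  | cons y ys ih =>
      by_cases h : y = x
      · subst h
        rw [List.filter_cons_of_neg (by simp), List.foldl_cons,
            show PySem.Set.add s y = s from by simp [PySem.Set.add, hx]]
        exact ih s hx
      · rw [List.filter_cons_of_pos (by simp [h]), List.foldl_cons, List.foldl_cons]
        exact ih (PySem.Set.add s y) (by simp [PySem.Set.add]; split <;> simp [hx])

-- a head element absent from the rest commutes out of the accumulator
theorem pv_foldl_add_cons (u : List String) (a : String) (s : List String) (ha : a ∉ u) :
    u.foldl PySem.Set.add (a :: s) = a :: u.foldl PySem.Set.add s := by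
  induction u generalizing s with
  | nil => rfl
  | cons y ys ih =>
      have hya : y ≠ a := fun h => ha (h ▸ List.mem_cons_self)
      rw [List.foldl_cons, List.foldl_cons]
      have : PySem.Set.add (a :: s) y = a :: PySem.Set.add s y := by
        simp [PySem.Set.add, PySem.Set.contains, hya]
        split <;> simp_all
      rw [this, ih _ (fun h => ha (List.mem_cons_of_mem _ h))]

-- dedup satisfies B's head-filter recursion
theorem pv_dedup_cons (h : String) (t : List String) :
    PySem.List.dedup (h :: t) = h :: PySem.List.dedup (t.filter (fun x => x ≠ h)) := by
  rw [PySem.List.dedup_eq_ofList, PySem.List.dedup_eq_ofList,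
      PySem.Set.ofList_eq_foldl, PySem.Set.ofList_eq_foldl, List.foldl_cons]
  have h1 : PySem.Set.add ([] : PySem.Set String) h = [h] := by simp [PySem.Set.add]
  rw [h1, ← pv_foldl_add_filter t [h] h (by simp),
      show ([h] : List String) = h :: [] from rfl,
      pv_foldl_add_cons _ h [] (by simp)]

theorem pv_uniqLoop_eq_dedup_aux : ∀ (n : Nat) (vals : List String), vals.length ≤ n →
    ∀ result, pvUniqLoop result vals = result ++ PySem.List.dedup vals := by
  intro n
  induction n with
  | zero =>
      intro vals hv result
      have hnil : vals = [] := List.eq_nil_of_length_eq_zero (Nat.le_zero.mp hv)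
      subst hnil
      rw [pvUniqLoop.eq_def]
      simp [PySem.List.dedup_eq_ofList, PySem.Set.ofList_eq_foldl]
  | succ n ih =>
      intro vals hv result
      match vals with
      | [] =>
          rw [pvUniqLoop.eq_def]
          simp [PySem.List.dedup_eq_ofList, PySem.Set.ofList_eq_foldl]
      | h :: t =>
          have step : pvUniqLoop result (h :: t)
              = pvUniqLoop (result ++ [h]) (t.filter (fun x => x ≠ h)) := by
            rw [pvUniqLoop.eq_def]
          rw [step, ih _ (le_trans (List.length_filter_le _ _) (Nat.le_of_succ_le_succ hv)),
              pv_dedup_cons]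
          simp

-- the worklist loop computes result ++ dedup vals
theorem pv_uniqLoop_eq_dedup (result vals : List String) :
    pvUniqLoop result vals = result ++ PySem.List.dedup vals :=
  pv_uniqLoop_eq_dedup_aux vals.length vals le_rfl result

-- ===== VERDICT (by name: the statement is the Claim_ definition above) =====
theorem get_parameters_fromBioD_spec : Claim_equal_get_parameters_fromBioD := by
  intro r data _
  show get_parameters_fromBioD r data = get_parameters_fromBioD_alt r data
  unfold get_parameters_fromBioD get_parameters_fromBioD_alt
  rw [pv_uniqLoop_eq_dedup, List.nil_append]
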